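-- pv_equiv track=rewrite | github.com/cirosantilli/project-euler-solutions | solvers/736.py | rhs_from_positions
-- ===== SOURCE A (Python) =====
-- from typing import Iterable, List, Sequence, Tuple
--
-- def rhs_from_positions(t: int, positions: Sequence[int]) -> int:
--     """
--     For fixed t, and a sorted multiset `positions` (values in [0, t-1]) of size s,
--     compute:
--         RHS = sum_{j=0..t-1} 2^{P_j}
--     where P_j = count(positions <= j).
--     """
--     s = len(positions)
--     idx = 0
--     total = 0
--     for j in range(t):
--         while idx < s and positions[idx] <= j:
--             idx += 1
--         total += 1 << idx
--     return total
-- ===== SOURCE B (Python) =====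
-- from typing import Sequence
--
-- def rhs_from_positions(t: int, positions: Sequence[int]) -> int:
--     # One pass over `positions` instead of A's loop over all t values of j:
--     # the two-pointer count sits at level m exactly while j >= running-max of
--     # the first m positions, so level m contributes (t - clamp(runmax,0,t)) * 2^m
--     # on top of a base of t ones.  Maximal runs of levels with equal clamped
--     # running max are flushed at once with the geometric closed form
--     # (t - c) * (2^m2 - 2^m1), and once the running max reaches t every further
--     # level contributes 0, so we stop there.
--     if t <= 0:
--         return 0
--     total = t
--     run = None
--     m = 0
--     seg_c = None
--     seg_start = 0
--     for x in positions:
--         run = x if run is None else max(run, x)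
--         if run >= t:
--             break
--         c = run if run > 0 else 0
--         if seg_c is None:
--             seg_c, seg_start = c, m
--         elif c != seg_c:
--             total += (t - seg_c) * ((1 << m) - (1 << seg_start))
--             seg_c, seg_start = c, m
--         m += 1
--     if seg_c is not None:
--         total += (t - seg_c) * ((1 << m) - (1 << seg_start))
--     return total
-- ===== Notes on version B (the rewrite author's own statement) =====
-- stated objective: faster
-- what changed: Instead of looping over all t values of j and adding 1<<idx each time, B makes one pass over positions tracking the running prefix-maximum, flushes each maximal run of levels with equal clamped running max in one geometric-series step (t-c)*(2^m2-2^m1), and stops as soon as the running max reaches t, cutting the number of bigint operations from O(t) to O(number of distinct clamped prefix-max values).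
import Mathlib
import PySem

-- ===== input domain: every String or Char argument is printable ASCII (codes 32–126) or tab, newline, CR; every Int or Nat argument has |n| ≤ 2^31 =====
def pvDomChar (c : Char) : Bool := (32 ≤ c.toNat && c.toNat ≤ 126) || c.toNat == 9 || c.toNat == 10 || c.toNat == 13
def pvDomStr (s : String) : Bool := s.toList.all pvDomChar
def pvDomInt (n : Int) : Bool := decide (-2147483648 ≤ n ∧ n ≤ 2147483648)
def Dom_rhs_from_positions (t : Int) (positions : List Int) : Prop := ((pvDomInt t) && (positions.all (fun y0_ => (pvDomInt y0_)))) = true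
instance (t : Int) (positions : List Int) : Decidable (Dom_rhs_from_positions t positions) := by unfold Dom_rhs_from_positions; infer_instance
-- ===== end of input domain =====

-- B replaces A's loop over all t values of j by one pass over `positions`
-- (running prefix-max, one term per level); objective: faster (O(len positions)
-- additions instead of O(t)).

-- ===== PORT A =====
-- inner `while idx < s and positions[idx] <= j: idx += 1` loop of A
def pvWhile (positions : List Int) (j : Int) (idx : Nat) : Nat :=
  if h : idx < positions.length then
    if positions[idx] ≤ j then pvWhile positions j (idx + 1) else idx
  else idx
termination_by positions.length - idx

def rhs_from_positions (t : Int) (positions : List Int) : Int :=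
  ((PySem.List.pyRange 0 t 1).foldl
    (fun (st : Nat × Int) j =>
      let idx := pvWhile positions j st.1
      (idx, st.2 + (1 : Int) <<< idx)) (0, 0)).2

-- ===== PORT B =====
-- B's `for x in positions: … break` loop; state: running max (None at start),
-- level m, open segment (coefficient, start level) or None, accumulated total
def pvLoopB (t : Int) : List Int → Option Int → Nat → Option (Int × Nat) → Int →
    Nat × Option (Int × Nat) × Int
  | [], _, m, seg?, tot => (m, seg?, tot)
  | x :: rest, run?, m, seg?, tot =>
    let run : Int := match run? with | none => x | some r => max r x
    if t ≤ run then (m, seg?, tot)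
    else
      let c : Int := if 0 < run then run else 0
      match seg? with
      | none => pvLoopB t rest (some run) (m + 1) (some (c, m)) tot
      | some (sc, st) =>
        if c ≠ sc then
          pvLoopB t rest (some run) (m + 1) (some (c, m))
            (tot + (t - sc) * ((1 : Int) <<< m - (1 : Int) <<< st))
        else
          pvLoopB t rest (some run) (m + 1) (some (sc, st)) tot

-- the `if seg_c is not None: total += …` flush after the loop
def pvFlush (t : Int) (stt : Nat × Option (Int × Nat) × Int) : Int :=
  match stt.2.1 with
  | none => stt.2.2
  | some (sc, st) => stt.2.2 + (t - sc) * ((1 : Int) <<< stt.1 - (1 : Int) <<< st)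

def rhs_from_positions_alt (t : Int) (positions : List Int) : Int :=
  if t ≤ 0 then 0 else pvFlush t (pvLoopB t positions none 0 none t)

-- ===== PRECONDITION & SPEC =====
def Spec_rhs_from_positions (t : Int) (positions : List Int) (out : Int) : Prop := out = rhs_from_positions_alt t positions
instance (t : Int) (positions : List Int) (out : Int) : Decidable (Spec_rhs_from_positions t positions out) := by unfold Spec_rhs_from_positions; infer_instance

-- ===== CLAIM (what is proved, stated in full; the proofs are below) =====
def Claim_equal_rhs_from_positions : Prop := ∀ (t : Int) (positions : List Int), Dom_rhs_from_positions t positions → Spec_rhs_from_positions t positions (rhs_from_positions t positions)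

-- ===== LEMMAS AND PROOFS =====

-- length of the all-≤-j prefix of positions: the value A's pointer reaches at step j
def pvL (positions : List Int) (j : Int) : Nat :=
  (positions.takeWhile (fun x => decide (x ≤ j))).length

-- B's grouped sum, written as a recursion carrying the clamped running maximum
def pvS (t : Int) : List Int → Int → Int
  | [], _ => 0
  | x :: rest, lo => (t - max lo (min (max x 0) t)) + 2 * pvS t rest (max lo (min (max x 0) t))

lemma pvL_le (positions : List Int) (j : Int) : pvL positions j ≤ positions.length :=
  List.Sublist.length_le (List.takeWhile_sublist _)

-- the element just past the all-≤-j prefix fails the test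
lemma pvTakeWhile_stop (p : Int → Bool) :
    ∀ (l : List Int) (h : (l.takeWhile p).length < l.length),
      p (l[(l.takeWhile p).length]) = false := by
  intro l
  induction l with
  | nil => simp
  | cons x xs ih =>
    by_cases hx : p x
    · simp only [List.takeWhile_cons, hx, if_true, List.length_cons, List.getElem_cons_succ]
      intro h
      exact ih (by simpa using h)
    · simp [hx]

lemma pvL_prefix_le (positions : List Int) (j : Int) {k : Nat} (hk : k < positions.length)
    (h : k < pvL positions j) : positions[k] ≤ j := by
  have hmem : positions[k] ∈ positions.takeWhile (fun x => decide (x ≤ j)) := by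
    have := (List.takeWhile_prefix (l := positions) (p := fun x => decide (x ≤ j)))
    have hk' : k < (positions.takeWhile (fun x => decide (x ≤ j))).length := h
    have heq := List.IsPrefix.getElem this hk'
    have hm := List.getElem_mem hk'
    rwa [heq] at hm
  simpa using List.mem_takeWhile_imp hmem

lemma pvWhile_eq (positions : List Int) (j : Int) :
    ∀ idx, idx ≤ positions.length →
      (∀ k (hk : k < positions.length), k < idx → positions[k] ≤ j) →
      pvWhile positions j idx = pvL positions j := by
  intro idx
  fun_induction pvWhile positions j idx with
  | case1 idx h hle ih =>
    intro hidx hpre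
    apply ih (by omega)
    intro k hk hlt
    rcases Nat.lt_or_ge k idx with h' | h'
    · exact hpre k hk h'
    · have : k = idx := by omega
      simpa [this] using hle
  | case2 idx h hgt =>
    intro hidx hpre
    -- the all-≤-j prefix has length exactly idx
    rcases Nat.lt_trichotomy idx (pvL positions j) with hlt | heq | hgt'
    · exact absurd (pvL_prefix_le positions j h hlt) hgt
    · exact heq.symm ▸ rfl
    · exfalso
      -- takeWhile stops before idx: some k < idx has positions[k] > j, contradiction
      have hkl : pvL positions j < positions.length := lt_of_lt_of_le hgt' (le_of_lt h)
      have hstop := pvTakeWhile_stop (fun x => decide (x ≤ j)) positions hkl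
      have : ¬ (positions[pvL positions j] ≤ j) := by
        simpa [pvL] using hstop
      exact this (hpre _ hkl hgt')
  | case3 idx h =>
    intro hidx hpre
    have hidx' : idx = positions.length := by omega
    have : positions.takeWhile (fun x => decide (x ≤ j)) = positions := by
      rw [List.takeWhile_eq_self_iff]
      intro a ha
      obtain ⟨k, hk, rfl⟩ := List.getElem_of_mem ha
      simpa using hpre k hk (by omega)
    simp [pvL, this, hidx']

-- the A-side fold over a nondecreasing list of j's, from a valid pointer state
lemma pvFoldA (positions : List Int) :
    ∀ (js : List Int) (idx0 : Nat) (tot0 : Int),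
      js.Pairwise (· ≤ ·) → idx0 ≤ positions.length →
      (∀ j ∈ js, ∀ k (hk : k < positions.length), k < idx0 → positions[k] ≤ j) →
      (js.foldl (fun (st : Nat × Int) j =>
          let idx := pvWhile positions j st.1
          (idx, st.2 + (1 : Int) <<< idx)) (idx0, tot0)).2
        = tot0 + (js.map (fun j => (2 : Int) ^ pvL positions j)).sum := by
  intro js
  induction js with
  | nil => intro idx0 tot0 _ _ _; simp
  | cons j js' ih =>
    intro idx0 tot0 hpw hidx hpre
    have hW : pvWhile positions j idx0 = pvL positions j :=
      pvWhile_eq positions j idx0 hidx (fun k hk hlt => hpre j (by simp) k hk hlt)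
    have hpw' := (List.pairwise_cons.mp hpw)
    simp only [List.foldl_cons, hW]
    rw [ih (pvL positions j) _ hpw'.2 (pvL_le _ _)
      (fun j' hj' k hk hlt =>
        le_trans (pvL_prefix_le positions j hk hlt) (hpw'.1 j' hj'))]
    simp [Int.shiftLeft_eq]
    ring

-- the bridge: the per-j sum over [lo, t) equals B's grouped sum
lemma pvBridge (t : Int) :
    ∀ (ps : List Int) (lo : Int), 0 ≤ lo → lo ≤ t →
      ((PySem.List.pyRange lo t 1).map (fun j => (2 : Int) ^ pvL ps j)).sum
        = (t - lo) + pvS t ps lo := by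
  intro ps
  induction ps with
  | nil =>
    intro lo h0 hlt
    simp only [pvL, List.takeWhile_nil, List.length_nil, pow_zero, pvS, add_zero]
    rw [PySem.List.sum_map_const_int, PySem.List.length_pyRange_one]
    omega
  | cons x rest ih =>
    intro lo h0 hlt
    set c := max lo (min (max x 0) t) with hc
    have hlc : lo ≤ c := le_max_left _ _
    have hct : c ≤ t := by omega
    rw [PySem.List.pyRange_one_append lo c t hlc hct]
    have hL : ∀ j : Int, pvL (x :: rest) j = if x ≤ j then pvL rest j + 1 else 0 := by
      intro j
      by_cases h : x ≤ j <;> simp [pvL, h]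
    rw [List.map_append, List.sum_append]
    have hlow : ((PySem.List.pyRange lo c 1).map (fun j => (2 : Int) ^ pvL (x :: rest) j)).sum
        = c - lo := by
      rw [List.map_congr_left (g := fun _ => (1 : Int)) ?_]
      · rw [PySem.List.sum_map_const_int, PySem.List.length_pyRange_one]
        omega
      · intro j hj
        rw [PySem.List.mem_pyRange_one] at hj
        have hxj : ¬ (x ≤ j) := by omega
        simp [hL, hxj]
    have hhigh : ((PySem.List.pyRange c t 1).map (fun j => (2 : Int) ^ pvL (x :: rest) j)).sum
        = 2 * ((t - c) + pvS t rest c) := by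
      rw [← ih c (by omega) hct]
      rw [← List.sum_map_mul_left]
      congr 1
      apply List.map_congr_left
      intro j hj
      rw [PySem.List.mem_pyRange_one] at hj
      have hxj : x ≤ j := by omega
      simp [hL, hxj]
      ring
    rw [hlow, hhigh]
    simp only [pvS, ← hc]
    ring

-- once the clamped running maximum is already t, every remaining term is 0
lemma pvS_top (t : Int) : ∀ (ps : List Int), pvS t ps t = 0 := by
  intro ps
  induction ps with
  | nil => simp [pvS]
  | cons x rest ih =>
    have h : max t (min (max x 0) t) = t := by omega
    simp [pvS, ih]

-- B's loop from a state with an open segment equals the grouped sum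
lemma pvLoopB_eq (t : Int) (ht : 0 < t) :
    ∀ (ps : List Int) (r : Int) (m st : Nat) (tot : Int), r < t →
      pvFlush t (pvLoopB t ps (some r) m (some (max r 0, st)) tot)
        = tot + (t - max r 0) * ((2 : Int) ^ m - (2 : Int) ^ st)
          + (2 : Int) ^ m * pvS t ps (max r 0) := by
  intro ps
  induction ps with
  | nil =>
    intro r m st tot _
    simp [pvLoopB, pvFlush, pvS, Int.shiftLeft_eq]
  | cons x rest ih =>
    intro r m st tot hr
    have hrun : (max r 0 : Int) < t := by omega
    by_cases hbr : t ≤ max r x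
    · have hx : t ≤ x := by omega
      have hminx : min (max x 0) t = t := by omega
      have hS : pvS t (x :: rest) (max r 0) = 0 := by
        show (t - max (max r 0) (min (max x 0) t))
            + 2 * pvS t rest (max (max r 0) (min (max x 0) t)) = 0
        rw [hminx, show max (max r 0) t = t from by omega, pvS_top]; ring
      show pvFlush t (if t ≤ max r x then (m, some (max r 0, st), tot) else _) = _
      rw [if_pos hbr, hS]
      simp [pvFlush, Int.shiftLeft_eq]
    · push Not at hbr
      have hx : x < t := by omega
      have hminx : min (max x 0) t = max x 0 := by omega
      have hSc : pvS t (x :: rest) (max r 0)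
          = (t - max (max r x) 0) + 2 * pvS t rest (max (max r x) 0) := by
        show (t - max (max r 0) (min (max x 0) t))
            + 2 * pvS t rest (max (max r 0) (min (max x 0) t)) = _
        rw [hminx, show max (max r 0) (max x 0) = max (max r x) 0 from by omega]
      have hc : (if (0 : Int) < max r x then max r x else 0) = max (max r x) 0 := by omega
      show pvFlush t (if t ≤ max r x then (m, some (max r 0, st), tot)
          else (match some (max r 0, st) with
            | none => pvLoopB t rest (some (max r x)) (m + 1)
                (some ((if (0 : Int) < max r x then max r x else 0), m)) tot
            | some (sc, st') =>
              if (if (0 : Int) < max r x then max r x else 0) ≠ sc then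
                pvLoopB t rest (some (max r x)) (m + 1)
                  (some ((if (0 : Int) < max r x then max r x else 0), m))
                  (tot + (t - sc) * ((1 : Int) <<< m - (1 : Int) <<< st'))
              else pvLoopB t rest (some (max r x)) (m + 1) (some (sc, st')) tot)) = _
      rw [if_neg (not_le.mpr hbr)]
      simp only [hc]
      by_cases hne : max (max r x) 0 ≠ max r 0
      · rw [if_pos hne]
        have := ih (max r x) (m + 1) m
          (tot + (t - max r 0) * ((1 : Int) <<< m - (1 : Int) <<< st)) hbr
        rw [show max (max r x) 0 = max (max r x) 0 from rfl] at this
        rw [this, hSc, Int.shiftLeft_eq, Int.shiftLeft_eq]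
        simp only [pow_succ]
        ring
      · rw [if_neg hne]
        push Not at hne
        have := ih (max r x) (m + 1) st tot hbr
        rw [hne] at this
        rw [this, hSc, hne]
        simp only [pow_succ]
        ring

lemma pvB_eq (t : Int) (ps : List Int) (ht : 0 < t) :
    rhs_from_positions_alt t ps = t + pvS t ps 0 := by
  rw [rhs_from_positions_alt, if_neg (by omega)]
  cases ps with
  | nil => simp [pvLoopB, pvFlush, pvS]
  | cons x rest =>
    have hshow : pvLoopB t (x :: rest) none 0 none t
        = (if t ≤ x then ((0 : Nat), (none : Option (Int × Nat)), t)
           else pvLoopB t rest (some x) 1 (some ((if (0 : Int) < x then x else 0), 0)) t) := rfl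
    have hScons : pvS t (x :: rest) 0
        = (t - max 0 (min (max x 0) t)) + 2 * pvS t rest (max 0 (min (max x 0) t)) := rfl
    by_cases hx : t ≤ x
    · have hc : max (0 : Int) (min (max x 0) t) = t := by omega
      rw [hshow, if_pos hx, hScons, hc, pvS_top]
      simp [pvFlush]
    · push Not at hx
      have hc0 : (if (0 : Int) < x then x else 0) = max x 0 := by omega
      have hlo : max (0 : Int) (min (max x 0) t) = max x 0 := by omega
      rw [hshow, if_neg (not_le.mpr hx), hc0, pvLoopB_eq t ht rest x 1 0 t hx,
        hScons, hlo]
      ring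

-- ===== VERDICT (by name: the statement is the Claim_ definition above) =====
theorem rhs_from_positions_spec : Claim_equal_rhs_from_positions := by
  intro t positions _
  unfold Spec_rhs_from_positions
  by_cases ht : t ≤ 0
  · rw [rhs_from_positions, rhs_from_positions_alt, if_pos ht,
      PySem.List.pyRange_one_eq_nil ht]
    simp
  · push Not at ht
    rw [rhs_from_positions, pvFoldA positions _ 0 0
      (List.Pairwise.imp le_of_lt (PySem.List.pairwise_lt_pyRange_one 0 t)) (by omega)
      (by intro j _ k _ h; omega)]
    rw [pvBridge t positions 0 le_rfl (by omega), pvB_eq t positions ht]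
    ring
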